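-- pv_equiv track=rewrite | github.com/danielladsouza/coding-challenge-prep | arrays/word_subsets.py | findUniversalStrings
-- ===== SOURCE A (Python) =====
-- from collections import Counter
--
-- def findUniversalStrings(A, reqdCharCounts):
--     """
--         Returns the subset of strings in A that meet the count of characters specified
--     """
--     results = []
--     for a in A:
--         aCounts = Counter(a)
--         for letter in reqdCharCounts:
--             if aCounts[letter] < reqdCharCounts[letter]:
--                 break
--         else:
--             results.append(a)
--     return results
-- ===== SOURCE B (Python) =====
-- def findUniversalStrings(A, reqdCharCounts):
--     # Progressive sieve: start with all of A and, for each positive requirement,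
--     # keep only the survivors holding enough copies of that character.
--     survivors = list(A)
--     for k, v in reqdCharCounts.items():
--         if v > 0:
--             survivors = [a for a in survivors if sum(ch == k for ch in a) >= v]
--     return survivors
-- ===== Notes on version B (the rewrite author's own statement) =====
-- stated objective: alternative
-- what changed: Inverts the loop nesting: instead of building a Counter per string and checking all requirements against it, B treats the requirement dict as a sequence of sieves and repeatedly filters the surviving strings, counting the one needed character on demand per pass; no Counter or per-string frequency table is ever built, and non-positive requirements filter nothing.
import Mathlib
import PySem

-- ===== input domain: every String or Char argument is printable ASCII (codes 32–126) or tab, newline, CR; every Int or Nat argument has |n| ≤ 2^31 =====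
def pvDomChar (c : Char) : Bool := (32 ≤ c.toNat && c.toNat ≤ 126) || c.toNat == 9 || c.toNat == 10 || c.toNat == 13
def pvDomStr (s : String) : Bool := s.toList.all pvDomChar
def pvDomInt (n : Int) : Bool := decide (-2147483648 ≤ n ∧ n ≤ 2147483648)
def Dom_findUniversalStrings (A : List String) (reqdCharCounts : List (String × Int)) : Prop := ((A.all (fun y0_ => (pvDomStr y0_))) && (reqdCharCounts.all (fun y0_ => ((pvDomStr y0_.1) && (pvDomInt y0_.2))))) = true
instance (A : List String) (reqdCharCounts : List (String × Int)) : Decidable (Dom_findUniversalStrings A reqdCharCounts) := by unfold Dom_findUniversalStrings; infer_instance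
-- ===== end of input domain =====

-- B inverts the loop nesting: instead of a Counter per string checked against every requirement,
-- it runs one sieve pass over the surviving strings per positive requirement, counting the one
-- needed character on demand (alternative decomposition; not claimed faster).


-- ===== PORT A =====
-- inner 'for letter in reqdCharCounts: if aCounts[letter] < reqdCharCounts[letter]: break / else:'
-- iterating the dict's (key, value) pairs in order; aCounts[letter] is Counter's 0-defaulting lookup.
def checkA (aCounts : PySem.Dict String Int) : List (String × Int) → Bool
  | [] => true
  | (letter, req) :: rest =>
      if aCounts.getD letter 0 < req then false else checkA aCounts rest

def findUniversalStrings (A : List String) (reqdCharCounts : List (String × Int)) : List String :=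
  A.foldl (fun results a =>
    let aCounts := PySem.Dict.counter (a.toList.map (fun c => String.ofList [c]))  -- Counter(a): 1-char-string keys
    if checkA aCounts reqdCharCounts then results ++ [a] else results) []

-- ===== PORT B =====
-- sum(ch == k for ch in a): booleans summed as 0/1 over the string's characters
def countEq (a : String) (k : String) : Int :=
  a.toList.foldl (fun n c => n + (if String.ofList [c] == k then 1 else 0)) 0

def findUniversalStrings_alt (A : List String) (reqdCharCounts : List (String × Int)) : List String :=
  reqdCharCounts.foldl (fun survivors p =>
    if 0 < p.2 then survivors.filter (fun a => decide (p.2 ≤ countEq a p.1)) else survivors) A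

-- ===== PRECONDITION & SPEC =====
def Spec_findUniversalStrings (A : List String) (reqdCharCounts : List (String × Int)) (out : List String) : Prop := out = findUniversalStrings_alt A reqdCharCounts
instance (A : List String) (reqdCharCounts : List (String × Int)) (out : List String) : Decidable (Spec_findUniversalStrings A reqdCharCounts out) := by unfold Spec_findUniversalStrings; infer_instance

-- ===== CLAIM (what is proved, stated in full; the proofs are below) =====
def Claim_equal_findUniversalStrings : Prop := ∀ (A : List String) (reqdCharCounts : List (String × Int)), Dom_findUniversalStrings A reqdCharCounts → Spec_findUniversalStrings A reqdCharCounts (findUniversalStrings A reqdCharCounts)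

-- ===== LEMMAS AND PROOFS =====

-- B's on-demand character count equals A's Counter lookup.
theorem countEq_eq_getD (a k : String) :
    countEq a k =
      (PySem.Dict.counter (a.toList.map (fun c => String.ofList [c]))).getD k 0 := by
  rw [PySem.Dict.getD_counter]
  unfold countEq
  have aux : ∀ (l : List Char) (n : Int),
      l.foldl (fun n c => n + (if String.ofList [c] == k then 1 else 0)) n
        = n + ((l.map (fun c => String.ofList [c])).count k : Int) := by
    intro l
    induction l with
    | nil => intro n; simp
    | cons c rest ih =>
      intro n
      simp only [List.foldl_cons, List.map_cons, List.count_cons, ih]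
      by_cases h : String.ofList [c] == k
      · simp [h]; ring
      · simp [h]
  simpa using aux a.toList 0

-- B's sieve fold equals filtering by A's break/else check.
theorem sieve_eq_filter (reqd : List (String × Int)) (A : List String) :
    findUniversalStrings_alt A reqd =
      A.filter (fun a =>
        checkA (PySem.Dict.counter (a.toList.map (fun c => String.ofList [c]))) reqd) := by
  induction reqd generalizing A with
  | nil =>
    simp [findUniversalStrings_alt, checkA]
  | cons p rest ih =>
    obtain ⟨k, v⟩ := p
    have step : findUniversalStrings_alt A ((k, v) :: rest)
        = findUniversalStrings_alt
            (if 0 < v then A.filter (fun a => decide (v ≤ countEq a k)) else A) rest := by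
      simp only [findUniversalStrings_alt, List.foldl_cons]
    rw [step, ih]
    by_cases hv : (0 : Int) < v
    · rw [if_pos hv, List.filter_filter]
      congr 1
      funext a
      simp only [checkA, countEq_eq_getD]
      by_cases h : (PySem.Dict.counter (a.toList.map (fun c => String.ofList [c]))).getD k 0 < v
      · rw [if_pos h, decide_eq_false (by omega), Bool.and_false]
      · rw [if_neg h, decide_eq_true (show v ≤ _ by omega), Bool.and_true]
    · rw [if_neg hv]
      congr 1
      funext a
      have hnn : (0 : Int) ≤ (PySem.Dict.counter (a.toList.map (fun c => String.ofList [c]))).getD k 0 := by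
        rw [PySem.Dict.getD_counter]; exact Int.natCast_nonneg _
      have h : ¬ (PySem.Dict.counter (a.toList.map (fun c => String.ofList [c]))).getD k 0 < v := by omega
      simp only [checkA]
      rw [if_neg h]

theorem findUniversalStrings_spec : Claim_equal_findUniversalStrings := by
  intro A reqd _
  unfold Spec_findUniversalStrings findUniversalStrings
  rw [sieve_eq_filter]
  have := PySem.List.foldl_append_if
    (fun a : String => checkA (PySem.Dict.counter (a.toList.map (fun c => String.ofList [c]))) reqd)
    (fun a : String => a) A []
  simp only [List.map_id'] at this
  rw [this]
  simp
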